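-- pv_equiv track=rewrite | github.com/rathourdevesh/SampleCodes | graduation_ceremony_problem.py | attendance_probability
-- ===== SOURCE A (Python) =====
-- def attendance_probability(N):
--     def count_attendance_patterns(N):
--         if N == 0:
--             return 1, 0
--
--         total_ways = [0] * (N + 1)
--         end_with_present = [0] * (N + 1)
--         end_with_1_absent = [0] * (N + 1)
--         end_with_2_absent = [0] * (N + 1)
--         end_with_3_absent = [0] * (N + 1)
--
--         total_ways[0] = 1
--         end_with_present[1] = 1
--         end_with_1_absent[1] = 1
--         end_with_2_absent[1] = 0
--         end_with_3_absent[1] = 0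
--         total_ways[1] = end_with_present[1] + end_with_1_absent[1]
--
--         for day in range(2, N + 1):
--             end_with_present[day] = total_ways[day - 1]
--             end_with_1_absent[day] = end_with_present[day - 1]
--             end_with_2_absent[day] = end_with_1_absent[day - 1]
--             end_with_3_absent[day] = end_with_2_absent[day - 1]
--             total_ways[day] = (end_with_present[day] + end_with_1_absent[day] +
--                                end_with_2_absent[day] + end_with_3_absent[day])
--
--         miss_graduation_ways = (end_with_1_absent[N] + end_with_2_absent[N] +
--                                 end_with_3_absent[N])
--
--         return total_ways[N], miss_graduation_ways
--     total_ways, miss_graduation_ways = count_attendance_patterns(N)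
--     return f"{miss_graduation_ways} / {total_ways}"
-- ===== SOURCE B (Python) =====
-- def attendance_probability(N):
--     if N < 1:
--         return "0 / 1"
--
--     def mat_mul(X, Y):
--         return tuple(tuple(sum(X[i][k] * Y[k][j] for k in range(4)) for j in range(4)) for i in range(4))
--
--     def mat_vec(X, v):
--         return tuple(sum(X[i][k] * v[k] for k in range(4)) for i in range(4))
--
--     R = ((1, 0, 0, 0), (0, 1, 0, 0), (0, 0, 1, 0), (0, 0, 0, 1))
--     M = ((1, 1, 1, 1), (1, 0, 0, 0), (0, 1, 0, 0), (0, 0, 1, 0))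
--     e = N - 1
--     while e:
--         if e & 1:
--             R = mat_mul(R, M)
--         M = mat_mul(M, M)
--         e >>= 1
--     p, a1, a2, a3 = mat_vec(R, (1, 1, 0, 0))
--     miss = a1 + a2 + a3
--     return f"{miss} / {miss + p}"
-- ===== Notes on version B (the rewrite author's own statement) =====
-- stated objective: faster
-- what changed: Replaces the O(N) day-by-day dynamic-programming loop over five arrays with binary exponentiation of the 4x4 transition matrix of the same recurrence (O(log N) matrix multiplications).
import Mathlib
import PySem

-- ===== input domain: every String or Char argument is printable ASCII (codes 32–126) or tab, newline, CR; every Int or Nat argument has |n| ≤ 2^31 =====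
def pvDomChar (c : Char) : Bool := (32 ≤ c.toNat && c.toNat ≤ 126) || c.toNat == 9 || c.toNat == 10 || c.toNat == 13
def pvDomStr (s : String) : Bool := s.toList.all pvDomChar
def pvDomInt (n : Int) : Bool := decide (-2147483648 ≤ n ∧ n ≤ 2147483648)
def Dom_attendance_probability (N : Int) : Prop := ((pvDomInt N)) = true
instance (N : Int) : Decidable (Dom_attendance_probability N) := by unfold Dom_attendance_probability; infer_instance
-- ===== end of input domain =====

-- B replaces A's O(N) day-by-day DP over five arrays by binary exponentiation of the
-- 4x4 transition matrix of the same recurrence (O(log N) matrix multiplications).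


-- ===== PORT A =====
-- the loop body: each day's new entries are written at index `day` and read from index
-- `day - 1`; on Pre_ (0 <= N) every index used is in range, so List.set / List.getD are exact
-- for Python's list assignment / subscript. The five state components are
-- (total_ways, end_with_present, end_with_1_absent, end_with_2_absent, end_with_3_absent).
def pvStepA (st : List Int × List Int × List Int × List Int × List Int) (day : Int) :
    List Int × List Int × List Int × List Int × List Int :=
  let d := day.toNat
  let ep' := st.2.1.set d (st.1.getD (d - 1) 0)
  let e1' := st.2.2.1.set d (st.2.1.getD (d - 1) 0)
  let e2' := st.2.2.2.1.set d (st.2.2.1.getD (d - 1) 0)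
  let e3' := st.2.2.2.2.set d (st.2.2.2.1.getD (d - 1) 0)
  let tw' := st.1.set d (ep'.getD d 0 + e1'.getD d 0 + e2'.getD d 0 + e3'.getD d 0)
  (tw', ep', e1', e2', e3')

def attendance_probability (N : Int) : String :=
  let res : Int × Int :=
    if N = 0 then (1, 0)
    else
      let n := (N + 1).toNat        -- the five lists [0] * (N + 1)
      let tw : List Int := (List.replicate n 0).set 0 1
      let ep : List Int := (List.replicate n 0).set 1 1
      let e1 : List Int := (List.replicate n 0).set 1 1
      let e2 : List Int := List.replicate n 0
      let e3 : List Int := List.replicate n 0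
      let tw := tw.set 1 (ep.getD 1 0 + e1.getD 1 0)
      let st := (PySem.List.pyRange 2 (N + 1) 1).foldl pvStepA (tw, ep, e1, e2, e3)
      let nn := N.toNat
      (st.1.getD nn 0, st.2.2.1.getD nn 0 + st.2.2.2.1.getD nn 0 + st.2.2.2.2.getD nn 0)
  PySem.Int.toStr res.2 ++ " / " ++ PySem.Int.toStr res.1

-- ===== PORT B =====
-- 4x4 integer matrix (Source B's tuple of 4 row tuples), entry xij = row i, column j
structure M4 where
  (x00 x01 x02 x03 x10 x11 x12 x13 x20 x21 x22 x23 x30 x31 x32 x33 : Int)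
deriving DecidableEq, Repr

def m4mul (X Y : M4) : M4 :=
  ⟨X.x00 * Y.x00 + X.x01 * Y.x10 + X.x02 * Y.x20 + X.x03 * Y.x30,
   X.x00 * Y.x01 + X.x01 * Y.x11 + X.x02 * Y.x21 + X.x03 * Y.x31,
   X.x00 * Y.x02 + X.x01 * Y.x12 + X.x02 * Y.x22 + X.x03 * Y.x32,
   X.x00 * Y.x03 + X.x01 * Y.x13 + X.x02 * Y.x23 + X.x03 * Y.x33,
   X.x10 * Y.x00 + X.x11 * Y.x10 + X.x12 * Y.x20 + X.x13 * Y.x30,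
   X.x10 * Y.x01 + X.x11 * Y.x11 + X.x12 * Y.x21 + X.x13 * Y.x31,
   X.x10 * Y.x02 + X.x11 * Y.x12 + X.x12 * Y.x22 + X.x13 * Y.x32,
   X.x10 * Y.x03 + X.x11 * Y.x13 + X.x12 * Y.x23 + X.x13 * Y.x33,
   X.x20 * Y.x00 + X.x21 * Y.x10 + X.x22 * Y.x20 + X.x23 * Y.x30,
   X.x20 * Y.x01 + X.x21 * Y.x11 + X.x22 * Y.x21 + X.x23 * Y.x31,
   X.x20 * Y.x02 + X.x21 * Y.x12 + X.x22 * Y.x22 + X.x23 * Y.x32,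
   X.x20 * Y.x03 + X.x21 * Y.x13 + X.x22 * Y.x23 + X.x23 * Y.x33,
   X.x30 * Y.x00 + X.x31 * Y.x10 + X.x32 * Y.x20 + X.x33 * Y.x30,
   X.x30 * Y.x01 + X.x31 * Y.x11 + X.x32 * Y.x21 + X.x33 * Y.x31,
   X.x30 * Y.x02 + X.x31 * Y.x12 + X.x32 * Y.x22 + X.x33 * Y.x32,
   X.x30 * Y.x03 + X.x31 * Y.x13 + X.x32 * Y.x23 + X.x33 * Y.x33⟩

def m4vec (X : M4) (v : Int × Int × Int × Int) : Int × Int × Int × Int :=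
  (X.x00 * v.1 + X.x01 * v.2.1 + X.x02 * v.2.2.1 + X.x03 * v.2.2.2,
   X.x10 * v.1 + X.x11 * v.2.1 + X.x12 * v.2.2.1 + X.x13 * v.2.2.2,
   X.x20 * v.1 + X.x21 * v.2.1 + X.x22 * v.2.2.1 + X.x23 * v.2.2.2,
   X.x30 * v.1 + X.x31 * v.2.1 + X.x32 * v.2.2.1 + X.x33 * v.2.2.2)

def m4I : M4 := ⟨1,0,0,0, 0,1,0,0, 0,0,1,0, 0,0,0,1⟩
def m4M : M4 := ⟨1,1,1,1, 1,0,0,0, 0,1,0,0, 0,0,1,0⟩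

-- Source B's `while e:` loop; `e & 1` = e % 2 = 1 and `e >>= 1` = e / 2 on the nonnegative e
def pvPowLoop (R M : M4) (e : Nat) : M4 :=
  if e = 0 then R
  else pvPowLoop (if e % 2 = 1 then m4mul R M else R) (m4mul M M) (e / 2)
decreasing_by exact Nat.div_lt_self (Nat.pos_of_ne_zero (by assumption)) (by norm_num)

def attendance_probability_alt (N : Int) : String :=
  if N < 1 then "0 / 1"
  else
    let R := pvPowLoop m4I m4M (N - 1).toNat
    let s := m4vec R (1, 1, 0, 0)
    let miss := s.2.1 + s.2.2.1 + s.2.2.2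
    PySem.Int.toStr miss ++ " / " ++ PySem.Int.toStr (miss + s.1)

-- ===== PRECONDITION & SPEC =====
-- A raises IndexError for negative N (it then indexes into empty lists); it returns on every other int
def Pre_attendance_probability (N : Int) : Prop := 0 ≤ N
instance (N : Int) : Decidable (Pre_attendance_probability N) := by unfold Pre_attendance_probability; infer_instance
def pvWitness_attendance_probability : Int := 5

def Spec_attendance_probability (N : Int) (out : String) : Prop := out = attendance_probability_alt N
instance (N : Int) (out : String) : Decidable (Spec_attendance_probability N out) := by unfold Spec_attendance_probability; infer_instance

-- ===== CLAIM (what is proved, stated in full; the proofs are below) =====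
def Claim_equal_attendance_probability : Prop := ∀ (N : Int), Dom_attendance_probability N → Pre_attendance_probability N → Spec_attendance_probability N (attendance_probability N)

-- ===== LEMMAS AND PROOFS =====

-- the common state: (P[d+1], A1[d+1], A2[d+1], A3[d+1]), day 1 at index 0
def pvSum (v : Int × Int × Int × Int) : Int := v.1 + v.2.1 + v.2.2.1 + v.2.2.2

def pvStepS (v : Int × Int × Int × Int) : Int × Int × Int × Int :=
  (pvSum v, v.1, v.2.1, v.2.2.1)

def pvS : Nat → Int × Int × Int × Int
  | 0 => (1, 1, 0, 0)
  | n + 1 => pvStepS (pvS n)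

-- ---- B side: pvPowLoop computes the matrix power, and powers act as pvStepS iterates ----
def m4pow (X : M4) : Nat → M4
  | 0 => m4I
  | n + 1 => m4mul (m4pow X n) X

lemma m4mul_assoc (X Y Z : M4) : m4mul (m4mul X Y) Z = m4mul X (m4mul Y Z) := by
  cases X; cases Y; cases Z; simp only [m4mul, M4.mk.injEq]; and_intros <;> ring

lemma m4mul_one (X : M4) : m4mul X m4I = X := by
  cases X; simp only [m4mul, m4I, M4.mk.injEq]; and_intros <;> ring

lemma one_m4mul (X : M4) : m4mul m4I X = X := by
  cases X; simp only [m4mul, m4I, M4.mk.injEq]; and_intros <;> ring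

lemma m4pow_succ' (X : M4) (n : Nat) : m4pow X (n + 1) = m4mul X (m4pow X n) := by
  induction n with
  | zero => simp [m4pow, m4mul_one, one_m4mul]
  | succ k ih =>
      calc m4pow X (k + 1 + 1) = m4mul (m4pow X (k + 1)) X := rfl
        _ = m4mul (m4mul X (m4pow X k)) X := by rw [ih]
        _ = m4mul X (m4mul (m4pow X k) X) := m4mul_assoc _ _ _
        _ = m4mul X (m4pow X (k + 1)) := rfl

lemma m4pow_sq (X : M4) (k : Nat) : m4pow (m4mul X X) k = m4pow X (2 * k) := by
  induction k with
  | zero => rfl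
  | succ n ih =>
      rw [show 2 * (n + 1) = 2 * n + 1 + 1 by ring]
      calc m4pow (m4mul X X) (n + 1) = m4mul (m4pow (m4mul X X) n) (m4mul X X) := rfl
        _ = m4mul (m4pow X (2 * n)) (m4mul X X) := by rw [ih]
        _ = m4mul (m4mul (m4pow X (2 * n)) X) X := (m4mul_assoc _ _ _).symm
        _ = m4pow X (2 * n + 1 + 1) := rfl

lemma pvPowLoop_eq (e : Nat) : ∀ R M : M4, pvPowLoop R M e = m4mul R (m4pow M e) := by
  induction e using Nat.strong_induction_on with
  | _ e ih =>
    intro R M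
    by_cases he : e = 0
    · subst he; simp [pvPowLoop, m4pow, m4mul_one]
    · rw [pvPowLoop, if_neg he, ih (e / 2) (Nat.div_lt_self (Nat.pos_of_ne_zero he) (by norm_num)),
        m4pow_sq]
      by_cases hp : e % 2 = 1
      · rw [if_pos hp, m4mul_assoc, ← m4pow_succ',
          show 2 * (e / 2) + 1 = e by omega]
      · rw [if_neg hp, show 2 * (e / 2) = e by omega]

lemma m4vec_mul (X Y : M4) (v : Int × Int × Int × Int) :
    m4vec (m4mul X Y) v = m4vec X (m4vec Y v) := by
  cases X; cases Y
  simp only [m4vec, m4mul, Prod.mk.injEq]; and_intros <;> ring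

lemma m4vec_M (v : Int × Int × Int × Int) : m4vec m4M v = pvStepS v := by
  simp only [m4vec, m4M, pvStepS, pvSum, Prod.mk.injEq]; and_intros <;> ring

lemma m4vec_pow (n : Nat) : m4vec (m4pow m4M n) (1, 1, 0, 0) = pvS n := by
  induction n with
  | zero => decide
  | succ k ih => rw [m4pow_succ', m4vec_mul, ih, m4vec_M]; rfl

lemma alt_closed (m : Nat) :
    attendance_probability_alt ((m : Int) + 1) =
      PySem.Int.toStr ((pvS m).2.1 + (pvS m).2.2.1 + (pvS m).2.2.2) ++ " / " ++
      PySem.Int.toStr ((pvS m).2.1 + (pvS m).2.2.1 + (pvS m).2.2.2 + (pvS m).1) := by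
  have h : ¬((m : Int) + 1 < 1) := by omega
  simp only [attendance_probability_alt, if_neg h]
  rw [show ((m : Int) + 1 - 1).toNat = m by omega, pvPowLoop_eq, one_m4mul, m4vec_pow]

-- ---- A side: glue facts about getD/set/replicate and the loop invariant ----
lemma pv_getD_set_self (l : List Int) (i : Nat) (x : Int) (h : i < l.length) :
    (l.set i x).getD i 0 = x := by
  simp [List.getD_eq_getElem?_getD, h]

lemma pv_getD_replicate (n j : Nat) : (List.replicate n (0:Int)).getD j 0 = 0 := by
  simp only [List.getD_eq_getElem?_getD, List.getElem?_replicate]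
  split <;> rfl

lemma a_loop (m : Nat) : ∀ (d : Nat), d ≤ m →
    ∀ st, st = (PySem.List.pyRange 2 ((d : Int) + 2) 1).foldl pvStepA
        ((((List.replicate (m + 2) (0:Int)).set 0 1).set 1 2,
          (List.replicate (m + 2) (0:Int)).set 1 1,
          (List.replicate (m + 2) (0:Int)).set 1 1,
          List.replicate (m + 2) (0:Int),
          List.replicate (m + 2) (0:Int))) →
    st.1.length = m + 2 ∧ st.2.1.length = m + 2 ∧ st.2.2.1.length = m + 2 ∧
    st.2.2.2.1.length = m + 2 ∧ st.2.2.2.2.length = m + 2 ∧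
    st.1.getD (d + 1) 0 = pvSum (pvS d) ∧
    st.2.1.getD (d + 1) 0 = (pvS d).1 ∧ st.2.2.1.getD (d + 1) 0 = (pvS d).2.1 ∧
    st.2.2.2.1.getD (d + 1) 0 = (pvS d).2.2.1 ∧ st.2.2.2.2.getD (d + 1) 0 = (pvS d).2.2.2 := by
  intro d
  induction d with
  | zero =>
      intro _ st hst
      rw [PySem.List.pyRange_one_eq_nil (by norm_num), List.foldl_nil] at hst
      subst hst
      refine ⟨by simp, by simp, by simp, by simp, by simp, ?_, ?_, ?_, ?_, ?_⟩
      · rw [pv_getD_set_self _ _ _ (by simp)]; norm_num [pvSum, pvS]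
      · rw [pv_getD_set_self _ _ _ (by simp)]; rfl
      · rw [pv_getD_set_self _ _ _ (by simp)]; rfl
      · rw [pv_getD_replicate]; rfl
      · rw [pv_getD_replicate]; rfl
  | succ d ih =>
      intro hle st hst
      obtain ⟨hlt, hlp, hl1, hl2, hl3, htw, hp, h1, h2, h3⟩ := ih (by omega) _ rfl
      rw [show ((d + 1 : Nat) : Int) + 2 = ((d : Int) + 2) + 1 by push_cast; ring,
        PySem.List.pyRange_one_succ_right (by omega), List.foldl_append, List.foldl_cons,
        List.foldl_nil] at hst
      subst hst
      simp only [pvStepA]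
      rw [show ((d : Int) + 2).toNat = d + 2 by omega]
      rw [show d + 2 - 1 = d + 1 by omega]
      have hne : d + 2 ≠ d + 1 := by omega
      have hm : d + 2 < m + 2 := by omega
      refine ⟨by simp [hlt], by simp [hlp], by simp [hl1], by simp [hl2], by simp [hl3],
        ?_, ?_, ?_, ?_, ?_⟩
      · rw [pv_getD_set_self _ _ _ (by simpa [hlt] using hm)]
        rw [pv_getD_set_self _ _ _ (by simpa [hlp] using hm),
            pv_getD_set_self _ _ _ (by simpa [hl1] using hm),
            pv_getD_set_self _ _ _ (by simpa [hl2] using hm),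
            pv_getD_set_self _ _ _ (by simpa [hl3] using hm)]
        rw [htw, hp, h1, h2]
        show _ = pvSum (pvStepS (pvS d))
        simp [pvStepS, pvSum]
      · rw [pv_getD_set_self _ _ _ (by simpa [hlp] using hm), htw]; rfl
      · rw [pv_getD_set_self _ _ _ (by simpa [hl1] using hm), hp]; rfl
      · rw [pv_getD_set_self _ _ _ (by simpa [hl2] using hm), h1]; rfl
      · rw [pv_getD_set_self _ _ _ (by simpa [hl3] using hm), h2]; rfl

lemma a_closed (m : Nat) :
    attendance_probability ((m : Int) + 1) =
      PySem.Int.toStr ((pvS m).2.1 + (pvS m).2.2.1 + (pvS m).2.2.2) ++ " / " ++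
      PySem.Int.toStr (pvSum (pvS m)) := by
  have h0 : ¬((m : Int) + 1 = 0) := by omega
  simp only [attendance_probability, if_neg h0]
  rw [show ((m : Int) + 1 + 1).toNat = m + 2 by omega,
      show ((m : Int) + 1).toNat = m + 1 by omega,
      show ((m : Int) + 1 + 1) = (m : Int) + 2 by ring]
  rw [pv_getD_set_self (List.replicate (m + 2) (0:Int)) 1 1 (by simp)]
  rw [show (1 : Int) + 1 = 2 by decide]
  obtain ⟨_, _, _, _, _, htw, _, h1, h2, h3⟩ := a_loop m m (le_refl m) _ rfl
  rw [htw, h1, h2, h3]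

-- ===== VERDICT (by name: the statement is the Claim_ definition above) =====
set_option maxRecDepth 4096 in
theorem attendance_probability_spec : Claim_equal_attendance_probability := by
  intro N _ hpre
  unfold Spec_attendance_probability
  rcases Int.eq_ofNat_of_zero_le hpre with ⟨n, rfl⟩
  cases n with
  | zero => rfl
  | succ m =>
      rw [show ((m + 1 : Nat) : Int) = (m : Int) + 1 by push_cast; ring, a_closed, alt_closed,
        show pvSum (pvS m) = (pvS m).2.1 + (pvS m).2.2.1 + (pvS m).2.2.2 + (pvS m).1 by
          simp [pvSum]; ring]
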